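-- pv_equiv track=rewrite | github.com/flying-scotsman/aoc-2025 | src/day6.py | get_columns_with_spaces
-- ===== SOURCE A (Python) =====
-- def get_columns_with_spaces(input: str):
--     columns = []
--     # First pad the lines with spaces up to the longest
--     length = max(len(l) for l in input)
--     for i in range(len(input)):
--         input[i] += " " * (length - len(input[i]))
--     counter = 0
--     last_save = 0  # This means I don't have to delete the input
--     while counter < length:
--         if counter == length - 1:
--             columns.append([line[last_save:] for line in input])
--             break
--         spacer = True
--         for line in input:
--             if line[counter] != " ":
--                 spacer = False
--                 break
--         if not spacer:
--             counter += 1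
--             continue
--         # Cut off the input up to this point and add it to a new column
--         columns.append([line[last_save:counter] for line in input])
--         counter += 1
--         last_save = counter
--     return columns
-- ===== SOURCE B (Python) =====
-- def get_columns_with_spaces(input):
--     length = max(len(l) for l in input)
--     for i in range(len(input)):
--         input[i] += " " * (length - len(input[i]))
--     n = len(input)
--     columns = []
--     cur = [""] * n
--     for c, col in enumerate(zip(*input)):
--         if c < length - 1 and all(ch == " " for ch in col):
--             columns.append(cur)
--             cur = [""] * n
--         else:
--             cur = [cur[r] + col[r] for r in range(n)]
--     if length > 0:
--         columns.append(cur)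
--     return columns
-- ===== Notes on version B (the rewrite author's own statement) =====
-- stated objective: alternative
-- what changed: A slices the padded row strings with a while-loop state machine over counter/last_save; B transposes the padded block with zip(*input) and walks the columns once, growing each segment's row strings character by character and emitting the segment when it meets an all-space column, so it never slices rows at all.
-- outside the precondition, e.g. on get_columns_with_spaces([]): A raises ValueError, B raises ValueError
import Mathlib
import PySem

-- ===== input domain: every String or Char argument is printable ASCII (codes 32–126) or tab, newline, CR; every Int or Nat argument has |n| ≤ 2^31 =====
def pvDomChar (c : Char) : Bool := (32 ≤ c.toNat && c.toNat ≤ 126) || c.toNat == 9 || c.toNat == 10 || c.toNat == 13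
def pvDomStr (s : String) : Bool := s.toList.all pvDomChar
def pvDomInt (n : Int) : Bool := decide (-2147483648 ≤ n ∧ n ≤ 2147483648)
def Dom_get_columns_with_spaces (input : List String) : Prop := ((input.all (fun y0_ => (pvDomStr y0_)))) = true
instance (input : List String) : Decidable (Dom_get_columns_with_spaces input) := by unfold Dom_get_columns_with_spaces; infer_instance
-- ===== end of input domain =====

-- B replaces A's row-slicing while-loop (counter/last_save state machine over the padded
-- row strings) by a column-major accumulation: it walks the transposed columns once and
-- grows each segment's row strings character by character, never slicing at all.
-- NOTE: the Python A mutates `input` in place (pads lines with spaces); B performs the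
-- same mutation; the Lean claim is about the RETURN value.

-- ===== PORT A =====

-- A's inner `for line in input: if line[counter] != " ": spacer = False; break`
def pvASpacer (lines : List String) (counter : Int) : Bool :=
  match lines with
  | [] => true
  | l :: rest =>
    match PySem.Str.pyGet? l counter with
    | some ch => if ch ≠ ' ' then false else pvASpacer rest counter
    | none => false  -- Python would raise IndexError; unreachable after padding

-- A's `while counter < length:` loop; state = (counter, last_save), columns produced in order
def pvALoop (lines : List String) (length counter last_save : Int) : List (List String) :=
  if h : counter < length then
    if counter = length - 1 then
      [lines.map (fun line => PySem.Str.slice line (some last_save) none)]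
    else if pvASpacer lines counter then
      lines.map (fun line => PySem.Str.slice line (some last_save) (some counter)) ::
        pvALoop lines length (counter + 1) (counter + 1)
    else
      pvALoop lines length (counter + 1) last_save
  else
    []
termination_by (length - counter).toNat
decreasing_by all_goals omega

def get_columns_with_spaces (input : List String) : List (List String) :=
  match PySem.List.max? (input.map (fun l => PySem.Str.len l)) (fun x => x) with
  | none => []  -- Python raises ValueError (max of empty); excluded by Pre_
  | some length =>
    let padded := input.map (fun l =>
      String.ofList (l.toList ++ List.replicate (length - PySem.Str.len l).toNat ' '))
    pvALoop padded length 0 0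

-- ===== PORT B =====

def get_columns_with_spaces_alt (input : List String) : List (List String) :=
  match PySem.List.max? (input.map (fun l => PySem.Str.len l)) (fun x => x) with
  | none => []  -- Python raises ValueError (max of empty); excluded by Pre_
  | some length =>
    let padded := input.map (fun l =>
      String.ofList (l.toList ++ List.replicate (length - PySem.Str.len l).toNat ' '))
    let n := padded.length
    -- `for c, col in enumerate(zip(*input))`: after padding every line has exactly
    -- `length` characters, so zip(*input) yields column c = (line[c] for line) for c in 0..length-1
    let st := (PySem.List.pyRange 0 length 1).foldl
      (fun (acc : List (List String) × List String) c =>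
        let col := padded.map (fun line => (PySem.Str.pyGet? line c).getD ' ')  -- index in range after padding
        if c < length - 1 && col.all (fun ch => ch == ' ') then
          (acc.1 ++ [acc.2], List.replicate n "")
        else
          (acc.1, (acc.2.zip col).map (fun p => String.ofList (p.1.toList ++ [p.2]))))
      ([], List.replicate n "")
    if 0 < length then st.1 ++ [st.2] else st.1

-- ===== PRECONDITION & SPEC =====
-- Pre_ excludes only the empty list, on which Python A raises ValueError (max() of empty sequence).
def Pre_get_columns_with_spaces (input : List String) : Prop := input ≠ []
instance (input : List String) : Decidable (Pre_get_columns_with_spaces input) := by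
  unfold Pre_get_columns_with_spaces; infer_instance

def pvWitness_get_columns_with_spaces : List String := ["ab c", "x  y"]

def Spec_get_columns_with_spaces (input : List String) (out : List (List String)) : Prop := out = get_columns_with_spaces_alt input
instance (input : List String) (out : List (List String)) : Decidable (Spec_get_columns_with_spaces input out) := by unfold Spec_get_columns_with_spaces; infer_instance

-- ===== CLAIM (what is proved, stated in full; the proofs are below) =====
def Claim_equal_get_columns_with_spaces : Prop := ∀ (input : List String), Dom_get_columns_with_spaces input → Pre_get_columns_with_spaces input → Spec_get_columns_with_spaces input (get_columns_with_spaces input)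

-- ===== LEMMAS AND PROOFS =====

-- Common normal form: the segments determined by the separator-column list
def pvBuild (lines : List String) (prev : Int) : List Int → List (List String)
  | [] => [lines.map (fun line => PySem.Str.slice line (some prev) none)]
  | c :: rest =>
    lines.map (fun line => PySem.Str.slice line (some prev) (some c)) ::
      pvBuild lines (c + 1) rest

-- A's spacer scan equals the List.all test
lemma pvASpacer_eq_all (lines : List String) (c : Int) :
    pvASpacer lines c = lines.all (fun line => PySem.Str.pyGet? line c == some ' ') := by
  induction lines with
  | nil => rfl
  | cons l rest ih =>
    simp only [pvASpacer, List.all_cons, ih]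
    cases h : PySem.Str.pyGet? l c with
    | none => simp
    | some ch =>
      by_cases hc : ch = ' ' <;> simp [hc]

-- A's loop from (counter, last_save) equals pvBuild over the separator columns in [counter, length-1)
lemma pvLoop_eq_build (lines : List String) (length counter prev : Int)
    (h : counter ≤ length - 1) :
    pvALoop lines length counter prev
      = pvBuild lines prev
          ((PySem.List.pyRange counter (length - 1) 1).filter
            (fun c => lines.all (fun line => PySem.Str.pyGet? line c == some ' '))) := by
  by_cases heq : counter = length - 1
  · rw [PySem.List.pyRange_one_eq_nil (by omega)]
    rw [pvALoop]
    rw [dif_pos (show counter < length by omega), if_pos heq]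
    rfl
  · have hlt : counter < length - 1 := lt_of_le_of_ne h heq
    rw [PySem.List.pyRange_one_cons hlt]
    rw [pvALoop]
    have h1 : counter < length := by omega
    simp only [dif_pos h1, if_neg heq]
    rw [pvASpacer_eq_all]
    by_cases hs : lines.all (fun line => PySem.Str.pyGet? line counter == some ' ') = true
    case pos =>
      rw [if_pos hs, List.filter_cons_of_pos (p := fun c => lines.all (fun line => PySem.Str.pyGet? line c == some ' ')) hs, pvBuild]
      rw [pvLoop_eq_build lines length (counter + 1) (counter + 1) (by omega)]
    case neg =>
      rw [if_neg hs, List.filter_cons_of_neg (p := fun c => lines.all (fun line => PySem.Str.pyGet? line c == some ' ')) (by simpa using hs)]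
      rw [pvLoop_eq_build lines length (counter + 1) prev (by omega)]
termination_by (length - counter).toNat
decreasing_by all_goals omega

-- in-range string indexing is `some`
lemma pvGet_some (line : String) (length k : Int) (hl : PySem.Str.len line = length)
    (h0 : 0 ≤ k) (hk : k < length) : ∃ ch, PySem.Str.pyGet? line k = some ch := by
  rw [PySem.Str.len_eq] at hl
  have hlt : k.toNat < line.toList.length := by omega
  refine ⟨line.toList[k.toNat], ?_⟩
  simp [PySem.List.pyGet?_of_nonneg _ h0, List.getElem?_eq_getElem hlt]

-- appending the character at k to the slice [prev:k] gives the slice [prev:k+1]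
lemma pvSlice_push (line : String) (prev k : Int) (ch : Char) (h0 : 0 ≤ prev) (h1 : prev ≤ k)
    (hget : PySem.Str.pyGet? line k = some ch) :
    String.ofList ((PySem.Str.slice line (some prev) (some k)).toList ++ [ch])
      = PySem.Str.slice line (some prev) (some (k + 1)) := by
  apply String.toList_inj.mp
  have hk0 : 0 ≤ k := le_trans h0 h1
  simp only [String.toList_ofList, PySem.Str.toList_slice, PySem.Chars.slice_eq_listSlice]
  simp only [PySem.Str.pyGet?_eq, PySem.Chars.pyGet?_eq_listPyGet?,
    PySem.List.pyGet?_of_nonneg _ hk0] at hget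
  have hklen : k.toNat < line.toList.length := by
    by_contra h
    rw [List.getElem?_eq_none (by omega)] at hget
    simp at hget
  rw [PySem.List.slice_toNat (b := k + 1) _ h0 (by omega),
    PySem.List.slice_toNat (b := k) _ h0 hk0]
  have h2 : (k + 1).toNat - prev.toNat = (k.toNat - prev.toNat) + 1 := by omega
  rw [h2, List.take_add_one]
  congr 1
  rw [List.getElem?_drop]
  have h3 : prev.toNat + (k.toNat - prev.toNat) = k.toNat := by omega
  rw [h3, hget]; rfl

-- slicing to the string's exact length is slicing to the end
lemma pvSlice_full (line : String) (prev b : Int) (h0 : 0 ≤ prev)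
    (hb : b = PySem.Str.len line) :
    PySem.Str.slice line (some prev) (some b) = PySem.Str.slice line (some prev) none := by
  apply String.toList_inj.mp
  rw [PySem.Str.len_eq] at hb
  simp only [PySem.Str.toList_slice, PySem.Chars.slice_eq_listSlice]
  rw [PySem.List.slice_toNat _ h0 (by omega), PySem.List.slice_from _ h0]
  apply List.take_of_length_le
  simp only [List.length_drop]
  omega

-- the empty slice
lemma pvSlice_nil (line : String) (a : Int) (h0 : 0 ≤ a) :
    PySem.Str.slice line (some a) (some a) = "" := by
  apply String.toList_inj.mp
  simp only [PySem.Str.toList_slice, PySem.Chars.slice_eq_listSlice]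
  rw [PySem.List.slice_toNat _ h0 h0]; simp

lemma pvReplicate_eq_map_slice (lines : List String) (a : Int) (h0 : 0 ≤ a) :
    List.replicate lines.length ""
      = lines.map (fun line => PySem.Str.slice line (some a) (some a)) := by
  symm; rw [List.map_eq_replicate_iff]
  intro x _; exact pvSlice_nil x a h0

-- B's all-space test over the extracted column equals A's test over the lines
lemma pvCol_all (lines : List String) (length k : Int)
    (hlen : ∀ l ∈ lines, PySem.Str.len l = length) (h0 : 0 ≤ k) (hk : k < length) :
    (lines.map (fun line => (PySem.Str.pyGet? line k).getD ' ')).all (fun ch => ch == ' ')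
      = lines.all (fun line => PySem.Str.pyGet? line k == some ' ') := by
  induction lines with
  | nil => rfl
  | cons l rest ih =>
    simp only [List.map_cons, List.all_cons]
    rw [ih (fun x hx => hlen x (List.mem_cons_of_mem l hx))]
    obtain ⟨ch, hch⟩ := pvGet_some l length k (hlen l List.mem_cons_self) h0 hk
    rw [hch]
    by_cases hc : ch = ' ' <;> simp [hc]

-- Main invariant for B's fold: starting at column k with every current segment equal to the
-- slice [prev:k], the fold over [k, length) followed by the tail append produces the
-- segments of pvBuild over the separator columns in [k, length-1)
lemma pvBfold_eq_build (lines : List String) (length k prev : Int)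
    (acc0 : List (List String)) (cur : List String)
    (hlen : ∀ l ∈ lines, PySem.Str.len l = length)
    (hcur : cur = lines.map (fun line => PySem.Str.slice line (some prev) (some k)))
    (h0 : 0 ≤ prev) (hpk : prev ≤ k) (hk : k ≤ length) :
    (((PySem.List.pyRange k length 1).foldl
        (fun (acc : List (List String) × List String) c =>
          let col := lines.map (fun line => (PySem.Str.pyGet? line c).getD ' ')
          if c < length - 1 && col.all (fun ch => ch == ' ') then
            (acc.1 ++ [acc.2], List.replicate lines.length "")
          else
            (acc.1, (acc.2.zip col).map (fun p => String.ofList (p.1.toList ++ [p.2]))))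
        (acc0, cur)).1
      ++ [((PySem.List.pyRange k length 1).foldl
        (fun (acc : List (List String) × List String) c =>
          let col := lines.map (fun line => (PySem.Str.pyGet? line c).getD ' ')
          if c < length - 1 && col.all (fun ch => ch == ' ') then
            (acc.1 ++ [acc.2], List.replicate lines.length "")
          else
            (acc.1, (acc.2.zip col).map (fun p => String.ofList (p.1.toList ++ [p.2]))))
        (acc0, cur)).2])
    = acc0 ++ pvBuild lines prev
        ((PySem.List.pyRange k (length - 1) 1).filter
          (fun c => lines.all (fun line => PySem.Str.pyGet? line c == some ' '))) := by
  subst hcur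
  by_cases hend : k = length
  · rw [hend, PySem.List.pyRange_one_eq_nil (le_refl length),
      PySem.List.pyRange_one_eq_nil (by omega)]
    simp only [List.foldl_nil, List.filter_nil, pvBuild]
    congr 2
    apply List.map_congr_left
    intro l hl
    exact pvSlice_full l prev length h0 (hlen l hl).symm
  · have hklt : k < length := lt_of_le_of_ne hk hend
    rw [PySem.List.pyRange_one_cons hklt]
    simp only [List.foldl_cons]
    rw [pvCol_all lines length k hlen (by omega) hklt]
    by_cases hsep : (k < length - 1 ∧
        lines.all (fun line => PySem.Str.pyGet? line k == some ' ') = true)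
    · rw [if_pos (by rw [Bool.and_eq_true, decide_eq_true_eq]; exact ⟨hsep.1, hsep.2⟩)]
      rw [PySem.List.pyRange_one_cons hsep.1,
        List.filter_cons_of_pos
          (p := fun c => lines.all (fun line => PySem.Str.pyGet? line c == some ' ')) hsep.2,
        pvBuild]
      rw [pvBfold_eq_build lines length (k + 1) (k + 1)
        (acc0 ++ [lines.map (fun line => PySem.Str.slice line (some prev) (some k))])
        (List.replicate lines.length "") hlen
        (pvReplicate_eq_map_slice lines (k + 1) (by omega)) (by omega) (le_refl _) (by omega)]
      simp
    · rw [if_neg (by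
        rw [Bool.and_eq_true, decide_eq_true_eq]
        rintro ⟨h1, h2⟩
        exact hsep ⟨h1, h2⟩)]
      have hnew : ((lines.map (fun line => PySem.Str.slice line (some prev) (some k))).zip
            (lines.map (fun line => (PySem.Str.pyGet? line k).getD ' '))).map
            (fun p => String.ofList (p.1.toList ++ [p.2]))
          = lines.map (fun line => PySem.Str.slice line (some prev) (some (k + 1))) := by
        rw [List.zip_map', List.map_map]
        apply List.map_congr_left
        intro l hl
        obtain ⟨ch, hch⟩ := pvGet_some l length k (hlen l hl) (by omega) hklt
        simp only [Function.comp_apply, hch, Option.getD_some]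
        exact pvSlice_push l prev k ch h0 hpk hch
      have hfil : ((PySem.List.pyRange k (length - 1) 1).filter
            (fun c => lines.all (fun line => PySem.Str.pyGet? line c == some ' ')))
          = ((PySem.List.pyRange (k + 1) (length - 1) 1).filter
            (fun c => lines.all (fun line => PySem.Str.pyGet? line c == some ' '))) := by
        by_cases hk1 : k < length - 1
        · rw [PySem.List.pyRange_one_cons hk1,
            List.filter_cons_of_neg
              (p := fun c => lines.all (fun line => PySem.Str.pyGet? line c == some ' '))
              (by simpa using fun h => hsep ⟨hk1, h⟩)]
        · rw [PySem.List.pyRange_one_eq_nil (by omega : length - 1 ≤ k),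
            PySem.List.pyRange_one_eq_nil (by omega : length - 1 ≤ k + 1)]
      rw [hnew, hfil,
        pvBfold_eq_build lines length (k + 1) prev acc0
          (lines.map (fun line => PySem.Str.slice line (some prev) (some (k + 1)))) hlen rfl
          h0 (by omega) (by omega)]
termination_by (length - k).toNat
decreasing_by all_goals omega

-- ===== VERDICT (by name: the statement is the Claim_ definition above) =====
theorem get_columns_with_spaces_spec : Claim_equal_get_columns_with_spaces := by
  intro input _ hpre
  cases input with
  | nil => exact absurd rfl hpre
  | cons x xs =>
    unfold Spec_get_columns_with_spaces get_columns_with_spaces get_columns_with_spaces_alt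
    rw [List.map_cons, PySem.List.max?_id_cons]
    set length := ((xs.map (fun l => PySem.Str.len l)).foldl max (PySem.Str.len x)) with hLdef
    have hmax := PySem.List.le_foldl_max (xs.map (fun l => PySem.Str.len l)) (PySem.Str.len x)
    have hlen0 : 0 ≤ length := by
      have h2 : (0 : Int) ≤ PySem.Str.len x := by rw [PySem.Str.len_eq]; positivity
      have := hmax.1; omega
    have hub : ∀ l ∈ x :: xs, PySem.Str.len l ≤ length := by
      intro l hl
      rcases List.mem_cons.mp hl with rfl | hl
      · exact hmax.1
      · exact hmax.2 _ (List.mem_map_of_mem hl)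
    simp only
    set padded := (x :: xs).map (fun l =>
      String.ofList (l.toList ++ List.replicate (length - PySem.Str.len l).toNat ' ')) with hpad
    have hplen : ∀ l ∈ padded, PySem.Str.len l = length := by
      intro l hl
      rw [hpad] at hl
      obtain ⟨l0, hl0, rfl⟩ := List.mem_map.mp hl
      have hle := hub l0 hl0
      simp only [PySem.Str.len_eq] at hle ⊢
      simp only [String.toList_ofList, List.length_append, List.length_replicate]
      omega
    by_cases h0 : length = 0
    · rw [if_neg (by omega), h0]
      rw [PySem.List.pyRange_one_eq_nil (le_refl 0)]
      rw [pvALoop]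
      simp
    · rw [if_pos (by omega)]
      rw [pvLoop_eq_build _ length 0 0 (by omega)]
      rw [pvBfold_eq_build padded length 0 0 [] (List.replicate padded.length "") hplen
        (pvReplicate_eq_map_slice padded 0 (le_refl 0)) (le_refl 0) (le_refl 0) (by omega)]
      simp
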